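-- pv_equiv track=rewrite | github.com/folubebe/vfootballprediction_tables | config.py | standardize_league_name
-- ===== SOURCE A (Python) =====
-- LEAGUE_NAME_MAPPING = {
--     # Raw names from Selenium -> Standardized names
--     'england': 'england virtual',
--     'spain': 'spain virtual',
--     'italy': 'italy virtual',
--     'germany': 'germany virtual',
--     'france': 'france virtual',
--
--     # Handle variations you might encounter
--     'england virtual': 'england virtual',
--     'spain virtual': 'spain virtual',
--     'italy virtual': 'italy virtual',
--     'germany virtual': 'germany virtual',
--     'france virtual': 'france virtual',
--
--     # Handle title case variations
--     'England': 'england virtual',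
--     'Spain': 'spain virtual',
--     'Italy': 'italy virtual',
--     'Germany': 'germany virtual',
--     'France': 'france virtual',
--
--     'England Virtual': 'england virtual',
--     'Spain Virtual': 'spain virtual',
--     'Italy Virtual': 'italy virtual',
--     'Germany Virtual': 'germany virtual',
--     'France Virtual': 'france virtual',
-- }
--
-- def standardize_league_name(league_name):
--     """
--     Standardize league names to consistent format.
--
--     Args:
--         league_name (str): Raw league name from any source
--
--     Returns:
--         str: Standardized league name
--     """
--     if not league_name:
--         return 'unknown virtual'
--
--     # Clean the input
--     league_name = str(league_name).strip()
--
--     # Try exact match first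
--     if league_name.lower() in LEAGUE_NAME_MAPPING:
--         return LEAGUE_NAME_MAPPING[league_name.lower()]
--
--     # Try with original case
--     if league_name in LEAGUE_NAME_MAPPING:
--         return LEAGUE_NAME_MAPPING[league_name]
--
--     # If contains any known league name, extract it
--     league_lower = league_name.lower()
--     for raw_name, standard_name in LEAGUE_NAME_MAPPING.items():
--         if raw_name.lower() in league_lower:
--             return standard_name
--
--     # Default: make it virtual
--     league_base = league_name.lower().replace('virtual', '').strip()
--     return f"{league_base} virtual"
-- ===== SOURCE B (Python) =====
-- def standardize_league_name(league_name):
--     """Standardize league names to consistent format (single-scan rewrite)."""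
--     if not league_name:
--         return 'unknown virtual'
--     s = str(league_name).strip().lower()
--     for country in ('england', 'spain', 'italy', 'germany', 'france'):
--         if country in s:
--             return f"{country} virtual"
--     return f"{s.replace('virtual', '').strip()} virtual"
-- ===== Notes on version B (the rewrite author's own statement) =====
-- stated objective: simpler
-- what changed: B drops the 20-entry mapping dict and its two exact-match lookup passes entirely, replacing A's three-stage logic (lower-key lookup, original-key lookup, 20-key containment scan) with a single first-match containment scan over the five country names, which is proved to subsume all three stages.
import Mathlib
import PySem

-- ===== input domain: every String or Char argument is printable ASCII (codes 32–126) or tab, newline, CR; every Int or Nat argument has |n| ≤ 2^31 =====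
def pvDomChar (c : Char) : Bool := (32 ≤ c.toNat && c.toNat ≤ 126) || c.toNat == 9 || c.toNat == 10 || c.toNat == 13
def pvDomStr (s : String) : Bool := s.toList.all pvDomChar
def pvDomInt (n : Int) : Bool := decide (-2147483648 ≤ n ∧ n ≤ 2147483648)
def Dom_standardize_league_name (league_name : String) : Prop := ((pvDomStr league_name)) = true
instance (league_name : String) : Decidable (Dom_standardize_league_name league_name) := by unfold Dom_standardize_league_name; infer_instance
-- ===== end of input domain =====

-- B replaces the mapping dict and its two exact-match lookups by a single first-match scan
-- over the five country names (objective: simpler); return value proved equal on all inputs.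

-- ===== PORT A =====
def pvLeagueMappingItems : List (String × String) :=
  [("england", "england virtual"), ("spain", "spain virtual"), ("italy", "italy virtual"),
   ("germany", "germany virtual"), ("france", "france virtual"),
   ("england virtual", "england virtual"), ("spain virtual", "spain virtual"),
   ("italy virtual", "italy virtual"), ("germany virtual", "germany virtual"),
   ("france virtual", "france virtual"),
   ("England", "england virtual"), ("Spain", "spain virtual"), ("Italy", "italy virtual"),
   ("Germany", "germany virtual"), ("France", "france virtual"),
   ("England Virtual", "england virtual"), ("Spain Virtual", "spain virtual"),
   ("Italy Virtual", "italy virtual"), ("Germany Virtual", "germany virtual"),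
   ("France Virtual", "france virtual")]

def LEAGUE_NAME_MAPPING : PySem.Dict String String := PySem.Dict.mk pvLeagueMappingItems

def standardize_league_name (league_name : String) : String :=
  if league_name == "" then "unknown virtual"
  else
    -- league_name = str(league_name).strip()
    match LEAGUE_NAME_MAPPING.get? (PySem.Str.lower (PySem.Str.strip league_name)) with
    | some v => v
    | none =>
      match LEAGUE_NAME_MAPPING.get? (PySem.Str.strip league_name) with
      | some v => v
      | none =>
        -- for raw_name, standard_name in LEAGUE_NAME_MAPPING.items(): first containment wins
        match LEAGUE_NAME_MAPPING.items.find?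
            (fun p => PySem.Str.isIn (PySem.Str.lower p.1)
              (PySem.Str.lower (PySem.Str.strip league_name))) with
        | some p => p.2
        | none =>
          PySem.Str.strip (PySem.Str.replace
            (PySem.Str.lower (PySem.Str.strip league_name)) "virtual" "") ++ " virtual"

-- ===== PORT B =====
def pvCountries : List String := ["england", "spain", "italy", "germany", "france"]

def standardize_league_name_alt (league_name : String) : String :=
  if league_name == "" then "unknown virtual"
  else
    -- s = str(league_name).strip().lower()
    match pvCountries.find?
        (fun c => PySem.Str.isIn c (PySem.Str.lower (PySem.Str.strip league_name))) with
    | some c => c ++ " virtual"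
    | none =>
      PySem.Str.strip (PySem.Str.replace
        (PySem.Str.lower (PySem.Str.strip league_name)) "virtual" "") ++ " virtual"

-- ===== PRECONDITION & SPEC =====
def Spec_standardize_league_name (league_name : String) (out : String) : Prop := out = standardize_league_name_alt league_name
instance (league_name : String) (out : String) : Decidable (Spec_standardize_league_name league_name out) := by unfold Spec_standardize_league_name; infer_instance

-- ===== CLAIM (what is proved, stated in full; the proofs are below) =====
def Claim_equal_standardize_league_name : Prop := ∀ (league_name : String), Dom_standardize_league_name league_name → Spec_standardize_league_name league_name (standardize_league_name league_name)

-- ===== LEMMAS AND PROOFS =====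

-- A lowered string contains no uppercase character, hence never equals a Title-case key.
lemma pv_lowerChar_not_upper (c : Char) : PySem.Chars.isupper (PySem.Chars.lowerChar c) = false := by
  unfold PySem.Chars.lowerChar PySem.Chars.isupper
  by_cases h : (decide ('A' ≤ c) && decide (c ≤ 'Z')) = true
  · rw [if_pos h]
    simp only [Bool.and_eq_true, decide_eq_true_eq, Char.le_def] at h
    obtain ⟨h1, h2⟩ := h
    have h65 : 65 ≤ c.toNat := UInt32.le_iff_toNat_le.mp h1
    have h90 : c.toNat ≤ 90 := UInt32.le_iff_toNat_le.mp h2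
    have hvalid : (c.toNat + 32).isValidChar := by left; omega
    have ht : (Char.ofNat (c.toNat + 32)).toNat = c.toNat + 32 := by
      simp [Char.toNat_ofNat, hvalid]
    have hz : ¬ ((Char.ofNat (c.toNat + 32)) ≤ 'Z') := by
      rw [Char.le_def]
      intro hle
      have hle2 := UInt32.le_iff_toNat_le.mp hle
      rw [show ((Char.ofNat (c.toNat + 32)).val.toNat) = (Char.ofNat (c.toNat + 32)).toNat from rfl,
        ht] at hle2
      have : c.toNat + 32 ≤ 90 := hle2
      omega
    simp [hz]
  · rw [if_neg h]; simpa using h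

lemma pv_lower_ne_of_upper_mem (t k : String) (c : Char) (hc : c ∈ k.toList)
    (hup : PySem.Chars.isupper c = true) : PySem.Str.lower t ≠ k := by
  intro h
  have hmem : c ∈ (PySem.Str.lower t).toList := h ▸ hc
  rw [PySem.Str.toList_lower] at hmem
  simp only [PySem.Chars.lower, List.mem_map] at hmem
  obtain ⟨d, _, hd⟩ := hmem
  have := pv_lowerChar_not_upper d
  rw [hd, hup] at this
  cases this

lemma pv_isIn_trans (a b u : String) (hab : PySem.Str.isIn a b = true)
    (h : PySem.Str.isIn b u = true) : PySem.Str.isIn a u = true := by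
  rw [PySem.Str.isIn_iff_infix] at hab h ⊢
  exact hab.trans h

lemma pv_isIn_false_mono (a b u : String) (hab : PySem.Str.isIn a b = true)
    (ha : PySem.Str.isIn a u = false) : PySem.Str.isIn b u = false := by
  cases hb : PySem.Str.isIn b u
  · rfl
  · rw [pv_isIn_trans a b u hab hb] at ha; cases ha

-- If the lowered name is a key of the mapping, B's country scan returns the mapped value.
lemma pv_lookup_lower (t v : String)
    (h : LEAGUE_NAME_MAPPING.get? (PySem.Str.lower t) = some v) :
    (pvCountries.find? (fun c => PySem.Str.isIn c (PySem.Str.lower t))).map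
      (fun c => c ++ " virtual") = some v := by
  have hm := PySem.Dict.mem_items_of_get?_eq_some LEAGUE_NAME_MAPPING h
  rw [show LEAGUE_NAME_MAPPING.items = pvLeagueMappingItems from rfl, pvLeagueMappingItems] at hm
  simp only [List.mem_cons, List.not_mem_nil, or_false, Prod.mk.injEq] at hm
  rcases hm with ⟨ht,hv⟩|⟨ht,hv⟩|⟨ht,hv⟩|⟨ht,hv⟩|⟨ht,hv⟩|⟨ht,hv⟩|⟨ht,hv⟩|⟨ht,hv⟩|⟨ht,hv⟩|⟨ht,hv⟩|⟨ht,hv⟩|⟨ht,hv⟩|⟨ht,hv⟩|⟨ht,hv⟩|⟨ht,hv⟩|⟨ht,hv⟩|⟨ht,hv⟩|⟨ht,hv⟩|⟨ht,hv⟩|⟨ht,hv⟩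
  all_goals subst hv
  all_goals first
  | (rw [ht]; decide)
  | (exact absurd ht (pv_lower_ne_of_upper_mem t _ 'E' (by decide) (by decide)))
  | (exact absurd ht (pv_lower_ne_of_upper_mem t _ 'S' (by decide) (by decide)))
  | (exact absurd ht (pv_lower_ne_of_upper_mem t _ 'I' (by decide) (by decide)))
  | (exact absurd ht (pv_lower_ne_of_upper_mem t _ 'G' (by decide) (by decide)))
  | (exact absurd ht (pv_lower_ne_of_upper_mem t _ 'F' (by decide) (by decide)))

-- If the lowered name is not a key, neither is the stripped original.
lemma pv_lookup_orig (t v : String)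
    (hl : LEAGUE_NAME_MAPPING.get? (PySem.Str.lower t) = none)
    (h : LEAGUE_NAME_MAPPING.get? t = some v) : False := by
  have hm := PySem.Dict.mem_items_of_get?_eq_some LEAGUE_NAME_MAPPING h
  rw [show LEAGUE_NAME_MAPPING.items = pvLeagueMappingItems from rfl, pvLeagueMappingItems] at hm
  simp only [List.mem_cons, List.not_mem_nil, or_false, Prod.mk.injEq] at hm
  rcases hm with ⟨ht,hv⟩|⟨ht,hv⟩|⟨ht,hv⟩|⟨ht,hv⟩|⟨ht,hv⟩|⟨ht,hv⟩|⟨ht,hv⟩|⟨ht,hv⟩|⟨ht,hv⟩|⟨ht,hv⟩|⟨ht,hv⟩|⟨ht,hv⟩|⟨ht,hv⟩|⟨ht,hv⟩|⟨ht,hv⟩|⟨ht,hv⟩|⟨ht,hv⟩|⟨ht,hv⟩|⟨ht,hv⟩|⟨ht,hv⟩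
  all_goals (subst ht; exact absurd hl (by decide))

-- A's 20-key containment scan agrees with B's 5-country scan.
set_option maxHeartbeats 1000000 in
lemma pv_scan_eq (u : String) :
    (pvLeagueMappingItems.find? (fun p => PySem.Str.isIn (PySem.Str.lower p.1) u)).map Prod.snd
    = (pvCountries.find? (fun c => PySem.Str.isIn c u)).map (fun c => c ++ " virtual") := by
  have e1 : PySem.Str.lower "england" = "england" := rfl
  have e2 : PySem.Str.lower "spain" = "spain" := rfl
  have e3 : PySem.Str.lower "italy" = "italy" := rfl
  have e4 : PySem.Str.lower "germany" = "germany" := rfl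
  have e5 : PySem.Str.lower "france" = "france" := rfl
  have e6 : PySem.Str.lower "england virtual" = "england virtual" := rfl
  have e7 : PySem.Str.lower "spain virtual" = "spain virtual" := rfl
  have e8 : PySem.Str.lower "italy virtual" = "italy virtual" := rfl
  have e9 : PySem.Str.lower "germany virtual" = "germany virtual" := rfl
  have e10 : PySem.Str.lower "france virtual" = "france virtual" := rfl
  have e11 : PySem.Str.lower "England" = "england" := rfl
  have e12 : PySem.Str.lower "Spain" = "spain" := rfl
  have e13 : PySem.Str.lower "Italy" = "italy" := rfl
  have e14 : PySem.Str.lower "Germany" = "germany" := rfl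
  have e15 : PySem.Str.lower "France" = "france" := rfl
  have e16 : PySem.Str.lower "England Virtual" = "england virtual" := rfl
  have e17 : PySem.Str.lower "Spain Virtual" = "spain virtual" := rfl
  have e18 : PySem.Str.lower "Italy Virtual" = "italy virtual" := rfl
  have e19 : PySem.Str.lower "Germany Virtual" = "germany virtual" := rfl
  have e20 : PySem.Str.lower "France Virtual" = "france virtual" := rfl
  cases h1 : PySem.Str.isIn "england" u with
  | true =>
    simp only [pvLeagueMappingItems, pvCountries, List.find?_cons, e1, h1, Option.map_some]
    rfl
  | false =>
  cases h2 : PySem.Str.isIn "spain" u with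
  | true =>
    simp only [pvLeagueMappingItems, pvCountries, List.find?_cons, e1, e2, h1, h2, Option.map_some]
    rfl
  | false =>
  cases h3 : PySem.Str.isIn "italy" u with
  | true =>
    simp only [pvLeagueMappingItems, pvCountries, List.find?_cons, e1, e2, e3, h1, h2, h3, Option.map_some]
    rfl
  | false =>
  cases h4 : PySem.Str.isIn "germany" u with
  | true =>
    simp only [pvLeagueMappingItems, pvCountries, List.find?_cons, e1, e2, e3, e4, h1, h2, h3, h4, Option.map_some]
    rfl
  | false =>
  cases h5 : PySem.Str.isIn "france" u with
  | true =>
    simp only [pvLeagueMappingItems, pvCountries, List.find?_cons, e1, e2, e3, e4, e5, h1, h2, h3, h4, h5, Option.map_some]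
    rfl
  | false =>
    have f1 : PySem.Str.isIn "england virtual" u = false := pv_isIn_false_mono "england" _ u (by decide) h1
    have f2 : PySem.Str.isIn "spain virtual" u = false := pv_isIn_false_mono "spain" _ u (by decide) h2
    have f3 : PySem.Str.isIn "italy virtual" u = false := pv_isIn_false_mono "italy" _ u (by decide) h3
    have f4 : PySem.Str.isIn "germany virtual" u = false := pv_isIn_false_mono "germany" _ u (by decide) h4
    have f5 : PySem.Str.isIn "france virtual" u = false := pv_isIn_false_mono "france" _ u (by decide) h5
    simp only [pvLeagueMappingItems, pvCountries, List.find?_cons,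
      e1, e2, e3, e4, e5, e6, e7, e8, e9, e10, e11, e12, e13, e14, e15, e16, e17, e18, e19, e20,
      h1, h2, h3, h4, h5, f1, f2, f3, f4, f5, List.find?_nil, Option.map_none]


-- ===== VERDICT (by name: the statement is the Claim_ definition above) =====
theorem standardize_league_name_spec : Claim_equal_standardize_league_name := by
  intro x _
  unfold Spec_standardize_league_name standardize_league_name standardize_league_name_alt
  by_cases hx : (x == "") = true
  · rw [if_pos hx, if_pos hx]
  · rw [if_neg hx, if_neg hx]
    cases hA : LEAGUE_NAME_MAPPING.get? (PySem.Str.lower (PySem.Str.strip x)) with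
    | some v =>
      have := pv_lookup_lower (PySem.Str.strip x) v hA
      cases hq : pvCountries.find?
          (fun c => PySem.Str.isIn c (PySem.Str.lower (PySem.Str.strip x))) with
      | none => rw [hq] at this; cases this
      | some c =>
        rw [hq] at this
        simp only [Option.map_some, Option.some.injEq] at this
        exact this.symm
    | none =>
      cases hB : LEAGUE_NAME_MAPPING.get? (PySem.Str.strip x) with
      | some v => exact (pv_lookup_orig (PySem.Str.strip x) v hA hB).elim
      | none =>
        have hs := pv_scan_eq (PySem.Str.lower (PySem.Str.strip x))
        cases hq : pvCountries.find?
            (fun c => PySem.Str.isIn c (PySem.Str.lower (PySem.Str.strip x))) with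
        | none =>
          rw [hq] at hs
          simp only [Option.map_none, Option.map_eq_none_iff] at hs
          rw [show LEAGUE_NAME_MAPPING.items = pvLeagueMappingItems from rfl, hs]
        | some c =>
          rw [hq] at hs
          cases hp : pvLeagueMappingItems.find?
              (fun p => PySem.Str.isIn (PySem.Str.lower p.1)
                (PySem.Str.lower (PySem.Str.strip x))) with
          | none => rw [hp] at hs; cases hs
          | some p =>
            rw [hp] at hs
            simp only [Option.map_some, Option.some.injEq] at hs
            rw [show LEAGUE_NAME_MAPPING.items = pvLeagueMappingItems from rfl, hp]
            exact hs
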